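-- pv_equiv track=rewrite | github.com/shintaro1993/atcoder | problem011-020/017_b.py | check
-- ===== SOURCE A (Python) =====
-- def check(s):
--     i = 0
--     n = len(s)
--     while i < n:
--         if i < n-1 and s[i:i+2] == "ch":
--             i += 2
--             continue
--         if s[i] in "oku":
--             i += 1
--             continue
--         return False
--     return True
-- ===== SOURCE B (Python) =====
-- def check(s):
--     t = s.replace("ch", "")
--     return all(c in "oku" for c in t)
-- ===== Notes on version B (the rewrite author's own statement) =====
-- stated objective: idiomatic
-- what changed: Replaces the manual index-advancing while-loop token scanner with a two-phase check: first delete every occurrence of the two-character token via str.replace, then test that every remaining character is one of the single-character tokens with all().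
import Mathlib
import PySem

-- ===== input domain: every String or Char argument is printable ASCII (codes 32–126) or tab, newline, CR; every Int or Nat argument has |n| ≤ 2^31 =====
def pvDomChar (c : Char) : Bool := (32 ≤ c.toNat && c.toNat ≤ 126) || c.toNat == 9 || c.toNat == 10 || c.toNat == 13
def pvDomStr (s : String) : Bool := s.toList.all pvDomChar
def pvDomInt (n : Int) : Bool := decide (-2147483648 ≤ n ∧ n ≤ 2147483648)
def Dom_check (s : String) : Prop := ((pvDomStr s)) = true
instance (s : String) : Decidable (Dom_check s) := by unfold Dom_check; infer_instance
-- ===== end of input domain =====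

-- B replaces A's index-advancing token scanner by "delete every 'ch', then check the rest is all o/k/u" (idiomatic; same cost).

-- ===== PORT A =====
-- A's while loop over index i becomes the obvious structural recursion on the
-- remaining characters s[i:]. The guard `i < n-1 and s[i:i+2] == "ch"` is, on a
-- remainder with at least two characters c1 :: c2 :: t, exactly c1 = 'c' ∧ c2 = 'h';
-- with fewer than two characters left it is false and only the `s[i] in "oku"` test runs.
def checkGo : List Char → Bool
  | [] => true
  | [c] => if "oku".toList.contains c then checkGo ([] : List Char) else false
  | c1 :: c2 :: t =>
    if c1 = 'c' ∧ c2 = 'h' then checkGo t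
    else if "oku".toList.contains c1 then checkGo (c2 :: t) else false

def check (s : String) : Bool := checkGo s.toList

-- ===== PORT B =====
-- t = s.replace("ch", ""); all(c in "oku" for c in t)
def check_alt (s : String) : Bool :=
  (PySem.Str.replace s "ch" "").toList.all (fun c => PySem.Chars.isIn [c] "oku".toList)

-- ===== PRECONDITION & SPEC =====
def Spec_check (s : String) (out : Bool) : Prop := out = check_alt s
instance (s : String) (out : Bool) : Decidable (Spec_check s out) := by unfold Spec_check; infer_instance

-- ===== CLAIM (what is proved, stated in full; the proofs are below) =====
def Claim_equal_check : Prop := ∀ (s : String), Dom_check s → Spec_check s (check s)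

-- ===== LEMMAS AND PROOFS =====

-- the result of deleting every (leftmost-first) occurrence of "ch"
def rep : List Char → List Char
  | [] => []
  | [c] => [c]
  | c1 :: c2 :: t => if c1 = 'c' ∧ c2 = 'h' then rep t else c1 :: rep (c2 :: t)

theorem go_eq_rep : ∀ (fuel : Nat) (l acc : List Char), l.length ≤ fuel →
    PySem.Chars.replace.go ['c','h'] [] fuel l acc = acc.reverse ++ rep l := by
  intro fuel
  induction fuel with
  | zero =>
    intro l acc h
    have : l = [] := List.eq_nil_of_length_eq_zero (Nat.le_zero.mp h)
    subst this
    simp [PySem.Chars.replace.go, rep]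
  | succ n ih =>
    intro l acc h
    match l with
    | [] => simp [PySem.Chars.replace.go, rep]
    | [c] =>
      have hp : (['c','h'] : List Char).isPrefixOf [c] = false := by
        simp [List.isPrefixOf]
      simp [PySem.Chars.replace.go, hp, rep]
      rw [ih [] (c :: acc) (by simp)]
      simp [rep]
    | c1 :: c2 :: t =>
      simp only [List.length_cons] at h
      by_cases hch : c1 = 'c' ∧ c2 = 'h'
      · obtain ⟨h1, h2⟩ := hch; subst h1; subst h2
        have hp : (['c','h'] : List Char).isPrefixOf ('c' :: 'h' :: t) = true := by
          simp [List.isPrefixOf]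
        simp only [PySem.Chars.replace.go, hp, if_true]
        rw [show (('c' :: 'h' :: t).drop (['c','h'] : List Char).length) = t from rfl]
        rw [ih t _ (by omega)]
        simp [rep]
      · have hp : (['c','h'] : List Char).isPrefixOf (c1 :: c2 :: t) = false := by
          rw [Bool.eq_false_iff]
          intro hpre
          rw [List.isPrefixOf_iff_prefix] at hpre
          rcases hpre with ⟨r, hr⟩
          simp at hr
          exact hch ⟨hr.1.symm, hr.2.1.symm⟩
        simp only [PySem.Chars.replace.go, hp, Bool.false_eq_true, if_false]
        rw [ih (c2 :: t) (c1 :: acc) (by simp; omega)]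
        simp [rep, hch]

theorem replace_eq_rep (l : List Char) :
    PySem.Chars.replace l ['c','h'] [] = rep l := by
  simp [PySem.Chars.replace]
  rw [go_eq_rep l.length l [] (le_refl _)]
  simp

theorem oku_mem (c : Char) :
    PySem.Chars.isIn [c] ['o','k','u'] = (['o','k','u'] : List Char).contains c := by
  by_cases hm : c ∈ (['o','k','u'] : List Char)
  · rw [(PySem.Chars.isIn_iff_infix _ _).mpr ((List.singleton_infix_iff c _).mpr hm)]
    simp [hm]
  · rw [(PySem.Chars.isIn_eq_false_iff _ _).mpr (fun hinf => hm ((List.singleton_infix_iff c _).mp hinf))]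
    simp [hm]

theorem checkGo_eq_rep_all (l : List Char) :
    checkGo l = (rep l).all (fun c => PySem.Chars.isIn [c] "oku".toList) := by
  have hoku : "oku".toList = (['o','k','u'] : List Char) := rfl
  fun_induction checkGo l <;> simp_all [rep, oku_mem]
  · -- ≥2 chars left, no "ch" token, head in "oku": both sides keep the head and recurse
    rename_i c1 c2 t hch hm ih
    have hni : ¬(c1 = 'c' ∧ c2 = 'h') := fun ⟨a, b⟩ => hch a b
    rw [if_neg hni, List.all_cons]
    rcases hm with rfl | rfl | rfl <;> simp
  · -- ≥2 chars left, no "ch" token, head not in "oku": both sides reject via the head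
    rename_i c1 c2 t hch hm
    have hni : ¬(c1 = 'c' ∧ c2 = 'h') := fun ⟨a, b⟩ => hch a b
    exact ⟨c1, by simp [hni], hm⟩

-- ===== VERDICT (by name: the statement is the Claim_ definition above) =====
theorem check_spec : Claim_equal_check := by
  intro s _
  unfold Spec_check check check_alt
  rw [PySem.Str.toList_replace]
  rw [show ("ch".toList) = (['c','h'] : List Char) from rfl,
      show ("".toList) = ([] : List Char) from rfl]
  rw [replace_eq_rep]
  exact checkGo_eq_rep_all s.toList
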